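-- pv_equiv track=rewrite | github.com/pattonj1272/bucketChallange | main.py | bucketify
-- ===== SOURCE A (Python) =====
-- def bucketify(words, size_of_bucket):
--     words = words.strip(' ').split(' ')
--     buckets = []
--     for word in words:
--
--         # if can add to bucket do so else return []
--         if len(word) <= size_of_bucket:
--             # buckets empty add first word
--             if len(buckets) == 0:
--                 buckets.append(word)
--
--             # if current bucket can fit the new word and the space
--             elif len(buckets[-1]) + len(word) + 1 <= size_of_bucket:
--                 buckets[-1] += " " + word
--
--             # must be added to new bucket
--             else:
--                 buckets.append(word)
--
--         # cannot be added to any bucket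
--         else:
--             return []
--
--     return buckets
-- ===== SOURCE B (Python) =====
-- def _take_bucket(ws, size):
--     # longest prefix of ws extending a bucket of current length len(ws[0])...
--     chunk = [ws[0]]
--     length = len(ws[0])
--     k = 1
--     while k < len(ws) and length + 1 + len(ws[k]) <= size:
--         length += 1 + len(ws[k])
--         chunk.append(ws[k])
--         k += 1
--     return chunk, ws[k:]
--
-- def bucketify(words, size_of_bucket):
--     ws = words.strip(' ').split(' ')
--     if any(len(w) > size_of_bucket for w in ws):
--         return []
--     out = []
--     rest = ws
--     while rest:
--         chunk, rest = _take_bucket(rest, size_of_bucket)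
--         out.append(' '.join(chunk))
--     return out
-- ===== Notes on version B (the rewrite author's own statement) =====
-- stated objective: alternative
-- what changed: B first validates all words in a separate pass (any word longer than the bucket means []), then repeatedly extracts the longest fitting prefix chunk and joins it, instead of A's single interleaved loop that grows buckets[-1] by string concatenation.
import Mathlib
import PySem

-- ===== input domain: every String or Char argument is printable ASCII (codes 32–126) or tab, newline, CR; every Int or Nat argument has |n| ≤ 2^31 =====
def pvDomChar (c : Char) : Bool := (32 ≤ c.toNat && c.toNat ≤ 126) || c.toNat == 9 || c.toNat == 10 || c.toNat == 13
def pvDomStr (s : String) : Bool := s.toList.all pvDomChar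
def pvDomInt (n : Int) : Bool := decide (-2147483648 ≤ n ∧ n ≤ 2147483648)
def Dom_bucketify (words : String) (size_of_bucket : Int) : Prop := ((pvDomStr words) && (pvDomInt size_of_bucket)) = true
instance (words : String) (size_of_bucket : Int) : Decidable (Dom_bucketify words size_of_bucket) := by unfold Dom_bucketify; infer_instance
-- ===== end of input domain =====

-- B validates all words in a separate upfront pass, then repeatedly extracts the longest
-- fitting prefix chunk and joins it — instead of A's single interleaved loop growing
-- buckets[-1] by string concatenation (objective: alternative decomposition, same cost).

-- ===== PORT A =====
def bucketifyA_loop (size : Int) : List String → List String → List String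
  | [], buckets => buckets
  | w :: rest, buckets =>
    if PySem.Str.len w ≤ size then
      if buckets.length == 0 then
        bucketifyA_loop size rest (buckets ++ [w])
      else if PySem.Str.len (PySem.List.pyGetD buckets (-1) "") + PySem.Str.len w + 1 ≤ size then
        -- buckets[-1] += " " + word  (in-place update of the last element)
        bucketifyA_loop size rest (buckets.dropLast ++ [PySem.List.pyGetD buckets (-1) "" ++ " " ++ w])
      else
        bucketifyA_loop size rest (buckets ++ [w])
    else []

def bucketify (words : String) (size_of_bucket : Int) : List String :=
  bucketifyA_loop size_of_bucket
    ((PySem.Str.split? (PySem.Str.stripChars words " ") " ").getD []) []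

-- ===== PORT B =====
-- _take_bucket's inner while: greedily take words while they still fit after `length`
def takeBucket (size : Int) (length : Int) : List String → (List String × List String)
  | [] => ([], [])
  | w :: rest =>
    if length + 1 + PySem.Str.len w ≤ size then
      let p := takeBucket size (length + 1 + PySem.Str.len w) rest
      (w :: p.1, p.2)
    else ([], w :: rest)

lemma takeBucket_snd_le (size : Int) : ∀ (ws : List String) (l : Int),
    (takeBucket size l ws).2.length ≤ ws.length := by
  intro ws
  induction ws with
  | nil => intro l; simp [takeBucket]
  | cons w rest ih =>
    intro l
    simp only [takeBucket]
    split
    · exact Nat.le_succ_of_le (ih _)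
    · simp

-- B's outer while: extract one bucket chunk at a time, joining it into the output
def bucketifyB_outer (size : Int) : List String → List String
  | [] => []
  | w :: rest =>
    let p := takeBucket size (PySem.Str.len w) rest
    PySem.Str.join " " (w :: p.1) :: bucketifyB_outer size p.2
  termination_by ws => ws.length
  decreasing_by
    exact Nat.lt_succ_of_le (takeBucket_snd_le size rest (PySem.Str.len w))

def bucketify_alt (words : String) (size_of_bucket : Int) : List String :=
  let ws := (PySem.Str.split? (PySem.Str.stripChars words " ") " ").getD []
  if ws.any (fun w => size_of_bucket < PySem.Str.len w) then []
  else bucketifyB_outer size_of_bucket ws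

-- ===== PRECONDITION & SPEC =====
def Spec_bucketify (words : String) (size_of_bucket : Int) (out : List String) : Prop := out = bucketify_alt words size_of_bucket
instance (words : String) (size_of_bucket : Int) (out : List String) : Decidable (Spec_bucketify words size_of_bucket out) := by unfold Spec_bucketify; infer_instance

-- ===== CLAIM (what is proved, stated in full; the proofs are below) =====
def Claim_equal_bucketify : Prop := ∀ (words : String) (size_of_bucket : Int), Dom_bucketify words size_of_bucket → Spec_bucketify words size_of_bucket (bucketify words size_of_bucket)

-- ===== LEMMAS AND PROOFS =====

-- intermediate characterisation of A's loop once the accumulator is nonempty: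
-- `cur` is the current (last) bucket string, `gs` the finished buckets
def goA (size : Int) (cur : String) : List String → List String
  | [] => [cur]
  | w :: rest =>
    if PySem.Str.len cur + PySem.Str.len w + 1 ≤ size then
      goA size (cur ++ " " ++ w) rest
    else
      cur :: goA size w rest

lemma strLen_append (s t : String) :
    PySem.Str.len (s ++ t) = PySem.Str.len s + PySem.Str.len t := by
  simp [PySem.Str.len_eq]

lemma strJoin_singleton (w : String) : PySem.Str.join " " [w] = w := by
  apply String.toList_inj.mp
  simp [PySem.Str.toList_join, PySem.Chars.join_singleton]

lemma strJoin_cons_cons (a b : String) (t : List String) :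
    PySem.Str.join " " (a :: b :: t) = PySem.Str.join " " ((a ++ " " ++ b) :: t) := by
  apply String.toList_inj.mp
  cases t with
  | nil =>
    simp [PySem.Str.toList_join, PySem.Chars.join_cons_cons, PySem.Chars.join_singleton]
  | cons c t' =>
    simp [PySem.Str.toList_join, PySem.Chars.join_cons_cons]

-- A's loop returns [] as soon as any remaining word is oversized
lemma loopA_oversized (size : Int) : ∀ (ws : List String) (buckets : List String),
    (∃ w ∈ ws, size < PySem.Str.len w) →
    bucketifyA_loop size ws buckets = [] := by
  intro ws
  induction ws with
  | nil => intro _ h; simp at h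
  | cons w rest ih =>
    intro buckets h
    simp only [bucketifyA_loop]
    by_cases hw : PySem.Str.len w ≤ size
    · have hrest : ∃ v ∈ rest, size < PySem.Str.len v := by
        rcases h with ⟨v, hv, hlt⟩
        rcases List.mem_cons.mp hv with hv | hv
        · subst hv; omega
        · exact ⟨v, hv, hlt⟩
      rw [if_pos hw]
      split
      · exact ih _ hrest
      · split <;> exact ih _ hrest
    · rw [if_neg hw]

-- A's loop with a nonempty accumulator equals finished buckets ++ goA on the current one
lemma loopA_eq_goA (size : Int) : ∀ (ws : List String),
    (∀ w ∈ ws, PySem.Str.len w ≤ size) →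
    ∀ (gs : List String) (cur : String),
    bucketifyA_loop size ws (gs ++ [cur]) = gs ++ goA size cur ws := by
  intro ws
  induction ws with
  | nil => intro _ gs cur; simp [bucketifyA_loop, goA]
  | cons w rest ih =>
    intro hfit gs cur
    have hw : PySem.Str.len w ≤ size := hfit w (by simp)
    have hrest : ∀ v ∈ rest, PySem.Str.len v ≤ size := fun v hv => hfit v (by simp [hv])
    simp only [bucketifyA_loop, goA]
    rw [if_pos hw, if_neg (by simp), PySem.List.pyGetD_neg_one_append_singleton]
    by_cases hjoin : PySem.Str.len cur + PySem.Str.len w + 1 ≤ size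
    · rw [if_pos hjoin, if_pos hjoin, List.dropLast_concat]
      exact ih hrest gs (cur ++ " " ++ w)
    · rw [if_neg hjoin, if_neg hjoin]
      have : gs ++ [cur] ++ [w] = (gs ++ [cur]) ++ [w] := by simp
      rw [this, ih hrest (gs ++ [cur]) w]
      simp

-- goA equals B's chunk extraction
lemma goA_eq_outer (size : Int) : ∀ (ws : List String) (cur : String),
    goA size cur ws =
      PySem.Str.join " " (cur :: (takeBucket size (PySem.Str.len cur) ws).1)
        :: bucketifyB_outer size (takeBucket size (PySem.Str.len cur) ws).2 := by
  intro ws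
  induction ws with
  | nil =>
    intro cur
    simp [goA, takeBucket, bucketifyB_outer, strJoin_singleton]
  | cons w rest ih =>
    intro cur
    simp only [goA, takeBucket]
    by_cases hjoin : PySem.Str.len cur + PySem.Str.len w + 1 ≤ size
    · have hjoin' : PySem.Str.len cur + 1 + PySem.Str.len w ≤ size := by omega
      rw [if_pos hjoin, if_pos hjoin', ih (cur ++ " " ++ w)]
      have hlen : PySem.Str.len (cur ++ " " ++ w)
          = PySem.Str.len cur + 1 + PySem.Str.len w := by
        rw [strLen_append, strLen_append, show PySem.Str.len " " = (1:Int) from by decide]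
      rw [hlen, strJoin_cons_cons]
    · have hjoin' : ¬ PySem.Str.len cur + 1 + PySem.Str.len w ≤ size := by omega
      rw [if_neg hjoin, if_neg hjoin']
      simp only [bucketifyB_outer]
      rw [ih w, strJoin_singleton]

-- ===== VERDICT (by name: the statement is the Claim_ definition above) =====
theorem bucketify_spec : Claim_equal_bucketify := by
  intro words size _
  unfold Spec_bucketify bucketify bucketify_alt
  show bucketifyA_loop size ((PySem.Str.split? (PySem.Str.stripChars words " ") " ").getD []) []
    = if ((PySem.Str.split? (PySem.Str.stripChars words " ") " ").getD []).any
        (fun w => size < PySem.Str.len w) then []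
      else bucketifyB_outer size ((PySem.Str.split? (PySem.Str.stripChars words " ") " ").getD [])
  generalize (PySem.Str.split? (PySem.Str.stripChars words " ") " ").getD [] = ws
  by_cases hbad : (ws.any (fun w => size < PySem.Str.len w)) = true
  · rw [if_pos hbad]
    apply loopA_oversized
    simpa [List.any_eq_true] using hbad
  · rw [if_neg hbad]
    have hfit : ∀ w ∈ ws, PySem.Str.len w ≤ size := by
      intro w hw
      by_contra h
      exact hbad (List.any_eq_true.mpr ⟨w, hw, decide_eq_true (lt_of_not_ge h)⟩)
    cases ws with
    | nil =>
      rw [show bucketifyA_loop size [] [] = ([] : List String) from rfl, bucketifyB_outer]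
    | cons w rest =>
      simp only [bucketifyA_loop]
      rw [if_pos (hfit w (by simp)), if_pos (by simp)]
      have h1 := loopA_eq_goA size rest (fun v hv => hfit v (by simp [hv])) [] w
      rw [List.nil_append] at h1
      rw [List.nil_append, h1, goA_eq_outer]
      simp [bucketifyB_outer]
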